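-- pv_equiv track=rewrite | github.com/juicetin/codeexercises | hackerrank/team_formation.py | find_smallest_consecutive_sublist
-- ===== SOURCE A (Python) =====
-- MAX_GROUP_SIZE = int(10e100 + 1)
--
-- def check_if_same_group(prev_num, cur_num):
--     return prev_num + 1 == cur_num
--
-- def build_list_of_team_sets(skill_list):
--     list_of_teams = []
--     for cur_skill in skill_list:
--         add_to_first_available_team(cur_skill, list_of_teams)
--     return list_of_teams
--
-- def add_to_first_available_team(cur_skill, list_of_teams):
--     for team in list_of_teams:
--         if len(team) > 0 and check_if_same_group(team[-1], cur_skill):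
--             team.append(cur_skill)
--             return
--     list_of_teams.append([cur_skill])
--
-- def find_smallest_consecutive_sublist(skill_list):
--     skill_list.sort()
--     if len(skill_list) == 0:
--         return 0
--
--     smallest_group = MAX_GROUP_SIZE
--     optimal_list_of_teams = build_list_of_team_sets(skill_list)
--     for team in optimal_list_of_teams:
--         if len(team) < smallest_group:
--             smallest_group = len(team)
--     return smallest_group
-- ===== SOURCE B (Python) =====
-- # One sorted pass over value runs with two length stacks (pending/active); no
-- # rescanning of the team list. Like A, this sorts skill_list in place.
-- def find_smallest_consecutive_sublist(skill_list):
--     skill_list.sort()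
--     if len(skill_list) == 0:
--         return 0
--     best = len(skill_list)          # every team length is at most len(skill_list)
--     prev = None
--     pending = []                    # lengths of teams ending at prev, awaiting extension
--     pi = 0                          # pending[pi:] is the still-unconsumed part
--     active = []                     # lengths of teams already ending at the current value
--     for x in skill_list:
--         if prev is None or x != prev:
--             # close the previous column: unextended pending teams are finished
--             for t in pending[pi:]:
--                 if t < best:
--                     best = t
--             if prev is not None and prev + 1 == x:
--                 pending = active    # current teams become extendable by x
--             else:
--                 for t in active:    # gap in values: every open team is finished
--                     if t < best:
--                         best = t
--                 pending = []
--             pi = 0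
--             active = []
--         if pi < len(pending):
--             active.append(pending[pi] + 1)
--             pi += 1
--         else:
--             active.append(1)
--         prev = x
--     for t in pending[pi:]:
--         if t < best:
--             best = t
--     for t in active:
--         if t < best:
--             best = t
--     return best
-- ===== Notes on version B (the rewrite author's own statement) =====
-- stated objective: faster
-- what changed: Replaces A's per-element scan over the whole growing team list with a single pass over the sorted list that keeps only two stacks of team lengths (teams extendable by the current value and teams already extended), retiring finished lengths into a running minimum.
import Mathlib
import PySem

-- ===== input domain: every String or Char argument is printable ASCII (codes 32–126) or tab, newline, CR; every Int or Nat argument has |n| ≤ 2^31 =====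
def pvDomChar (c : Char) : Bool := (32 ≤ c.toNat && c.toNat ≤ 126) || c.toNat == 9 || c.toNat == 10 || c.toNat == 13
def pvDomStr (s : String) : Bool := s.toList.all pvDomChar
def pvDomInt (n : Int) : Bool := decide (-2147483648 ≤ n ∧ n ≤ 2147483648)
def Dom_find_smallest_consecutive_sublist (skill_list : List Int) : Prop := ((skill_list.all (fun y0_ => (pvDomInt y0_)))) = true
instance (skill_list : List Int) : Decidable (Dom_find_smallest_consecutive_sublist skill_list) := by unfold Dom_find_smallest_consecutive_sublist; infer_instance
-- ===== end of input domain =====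

-- B replaces A's rescans of the whole team list by one pass over the sorted list keeping two
-- stacks of team lengths (measured faster). Python A and B both sort the argument in place;
-- the equivalence proved here is about the return value.

-- ===== PORT A =====
def check_if_same_group (prev_num cur_num : Int) : Bool := prev_num + 1 == cur_num

-- 'len(team) > 0 and check_if_same_group(team[-1], cur_skill)'; team[-1] is evaluated only
-- under len(team) > 0, where pyGetD's default is unreachable.
def pvMatch (cur_skill : Int) (team : List Int) : Bool :=
  decide (0 < team.length) && check_if_same_group (PySem.List.pyGetD team (-1) 0) cur_skill

def add_to_first_available_team (cur_skill : Int) : List (List Int) → List (List Int)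
  | [] => [[cur_skill]]
  | team :: rest =>
    if pvMatch cur_skill team then (team ++ [cur_skill]) :: rest
    else team :: add_to_first_available_team cur_skill rest

def build_list_of_team_sets (skill_list : List Int) : List (List Int) :=
  skill_list.foldl (fun acc x => add_to_first_available_team x acc) []

-- int(10e100 + 1): 10e100 is the float 1e101, whose exact integer value is this literal
def MAX_GROUP_SIZE : Int := 99999999999999997704951326524533662844684271992415000612999597473199345218078991130326129448151154688

def find_smallest_consecutive_sublist (skill_list : List Int) : Int :=
  let s := PySem.List.sorted skill_list (fun x => x) false
  if s.length = 0 then 0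
  else
    (build_list_of_team_sets s).foldl
      (fun sg team => if (team.length : Int) < sg then (team.length : Int) else sg)
      MAX_GROUP_SIZE

-- ===== PORT B =====
-- 'for t in l: if t < best: best = t'
def retireMin (best : Int) (l : List Int) : Int :=
  l.foldl (fun b t => if t < b then t else b) best

-- one iteration of Source B's main loop; Source B's suffix pending[pi:] is modelled as the list pending
def stepB (st : Option Int × List Int × List Int × Int) (x : Int) :
    Option Int × List Int × List Int × Int :=
  let (prev, pending, active, best) := st
  let (pending, active, best) :=
    if prev = some x then (pending, active, best)
    else
      let best := retireMin best pending
      if prev = some (x - 1) then (active, ([] : List Int), best)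
      else (([] : List Int), ([] : List Int), retireMin best active)
  match pending with
  | p :: rest => (some x, rest, active ++ [p + 1], best)
  | [] => (some x, ([] : List Int), active ++ [1], best)

def find_smallest_consecutive_sublist_alt (skill_list : List Int) : Int :=
  let s := PySem.List.sorted skill_list (fun x => x) false
  if s.length = 0 then 0
  else
    let st := s.foldl stepB (none, [], [], (s.length : Int))
    retireMin (retireMin st.2.2.2 st.2.1) st.2.2.1

-- ===== PRECONDITION & SPEC =====
def Spec_find_smallest_consecutive_sublist (skill_list : List Int) (out : Int) : Prop := out = find_smallest_consecutive_sublist_alt skill_list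
instance (skill_list : List Int) (out : Int) : Decidable (Spec_find_smallest_consecutive_sublist skill_list out) := by unfold Spec_find_smallest_consecutive_sublist; infer_instance

-- ===== CLAIM (what is proved, stated in full; the proofs are below) =====
def Claim_equal_find_smallest_consecutive_sublist : Prop := ∀ (skill_list : List Int), Dom_find_smallest_consecutive_sublist skill_list → Spec_find_smallest_consecutive_sublist skill_list (find_smallest_consecutive_sublist skill_list)

-- ===== LEMMAS AND PROOFS =====

-- 'the last element of t is v'
def lastIs (v : Int) (t : List Int) : Bool := t.getLast? == some v
-- 't still participates in the current (value v) or previous (value v-1) column'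
def combT (v : Int) (t : List Int) : Bool := lastIs v t || lastIs (v-1) t
def lens (ts : List (List Int)) : List Int := ts.map (fun t => (t.length : Int))
def Mf (i : Int) (l : List Int) : Int := l.foldl min i

-- shape of every team built by A's greedy: nonempty, consecutive ints from a to l, l ≤ v
def TeamOK (v : Int) (t : List Int) : Prop :=
  ∃ a l : Int, t.head? = some a ∧ t.getLast? = some l ∧ (t.length : Int) = l - a + 1 ∧
    l ≤ v ∧ -2147483648 ≤ a

-- simulation invariant tying A's team list to B's loop state after the same processed prefix
def GInv (n v : Int) (teams : List (List Int)) (pending active : List Int) (best : Int) : Prop :=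
  active = lens (teams.filter (lastIs v)) ∧
  pending = lens (teams.filter (lastIs (v-1))) ∧
  teams.filter (combT v) = teams.filter (lastIs v) ++ teams.filter (lastIs (v-1)) ∧
  best = Mf n (lens (teams.filter (fun t => !combT v t))) ∧
  ∀ t ∈ teams, TeamOK v t

def finalA (ts : List (List Int)) : Int :=
  ts.foldl (fun sg team => if (team.length : Int) < sg then (team.length : Int) else sg)
    MAX_GROUP_SIZE

def finalB (st : Option Int × List Int × List Int × Int) : Int :=
  retireMin (retireMin st.2.2.2 st.2.1) st.2.2.1

-- ----- Mf toolbox -----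
lemma retireMin_eq_Mf (b : Int) (l : List Int) : retireMin b l = Mf b l := by
  have h : (fun (b t : Int) => if t < b then t else b) = (fun (b t : Int) => min b t) := by
    funext b t; rw [min_def]; split_ifs <;> omega
  simp only [retireMin, Mf, h]

lemma Mf_cons (i x : Int) (l : List Int) : Mf i (x :: l) = Mf (min i x) l := rfl

lemma Mf_append (i : Int) (l l' : List Int) : Mf i (l ++ l') = Mf (Mf i l) l' := by
  simp [Mf, List.foldl_append]

lemma Mf_perm {l l' : List Int} (h : l.Perm l') (i : Int) : Mf i l = Mf i l' := by
  induction h generalizing i with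
  | nil => rfl
  | cons x _ ih => rw [Mf_cons, Mf_cons, ih]
  | swap x y l => rw [Mf_cons, Mf_cons, Mf_cons, Mf_cons, min_right_comm]
  | trans _ _ ih1 ih2 => rw [ih1, ih2]

lemma Mf_init_congr : ∀ (l : List Int) (i j : Int), (∃ x ∈ l, x ≤ i ∧ x ≤ j) → Mf i l = Mf j l := by
  intro l
  induction l with
  | nil => rintro i j ⟨x, hx, -⟩; cases hx
  | cons a l ih =>
    rintro i j ⟨x, hx, hxi, hxj⟩
    rw [Mf_cons, Mf_cons]
    rcases List.mem_cons.mp hx with rfl | hx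
    · rw [min_eq_right hxi, min_eq_right hxj]
    · by_cases hxa : x ≤ a
      · exact ih _ _ ⟨x, hx, le_min hxi hxa, le_min hxj hxa⟩
      · rw [min_eq_right (by omega), min_eq_right (by omega)]

lemma finalA_eq (ts : List (List Int)) : finalA ts = Mf MAX_GROUP_SIZE (lens ts) := by
  have h : (fun (b t : Int) => if t < b then t else b) = (fun (b t : Int) => min b t) := by
    funext b t; rw [min_def]; split_ifs <;> omega
  simp only [finalA, Mf, lens, List.foldl_map]
  simp only [show (fun (sg : Int) (team : List Int) =>
      if (team.length : Int) < sg then (team.length : Int) else sg)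
    = (fun (sg : Int) (team : List Int) => min sg (team.length : Int)) from by
      funext sg t; rw [min_def]; split_ifs <;> omega]

-- ----- Bool/filter toolbox -----
lemma lastIs_iff {v : Int} {t : List Int} : lastIs v t = true ↔ t.getLast? = some v := by
  simp [lastIs]

lemma filter_or_perm {α : Type} (p q : α → Bool) (l : List α)
    (hdisj : ∀ a ∈ l, ¬(p a = true ∧ q a = true)) :
    (l.filter p ++ l.filter q).Perm (l.filter (fun a => p a || q a)) := by
  induction l with
  | nil => simp
  | cons a l ih =>
    have ih' := ih (fun b hb => hdisj b (List.mem_cons_of_mem a hb))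
    cases hp : p a with
    | true =>
      have hq : q a = false := by
        cases hq : q a with
        | false => rfl
        | true => exact absurd ⟨hp, hq⟩ (hdisj a (List.mem_cons_self ..))
      simp only [List.filter_cons, hp, hq, if_true, if_false, Bool.false_eq_true, Bool.true_or,
        List.cons_append]
      exact ih'.cons a
    | false =>
      cases hq : q a with
      | true =>
        simp only [List.filter_cons, hp, hq, if_true, if_false, Bool.false_eq_true,
          Bool.false_or]
        exact ((List.perm_middle).trans (ih'.cons a))
      | false =>
        simp only [List.filter_cons, hp, hq, if_false, Bool.false_eq_true, Bool.false_or]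
        exact ih'

lemma split_unique {α : Type} (p : α → Bool) :
    ∀ (l1 l3 : List α) {a b : α} {l2 l4 : List α},
      l1 ++ a :: l2 = l3 ++ b :: l4 →
      (∀ y ∈ l1, p y = true) → p a = false →
      (∀ y ∈ l3, p y = true) → p b = false →
      l1 = l3 ∧ a = b ∧ l2 = l4 := by
  intro l1
  induction l1 with
  | nil =>
    intro l3 a b l2 l4 heq h1 ha h3 hb
    cases l3 with
    | nil =>
      simp only [List.nil_append] at heq
      injection heq with e1 e2
      exact ⟨rfl, e1, e2⟩
    | cons c l3 =>
      simp only [List.nil_append, List.cons_append] at heq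
      have hac : a = c := by injection heq
      have := h3 c (List.mem_cons_self ..)
      rw [← hac] at this; rw [this] at ha; cases ha
  | cons c l1 ih =>
    intro l3 a b l2 l4 heq h1 ha h3 hb
    cases l3 with
    | nil =>
      simp only [List.cons_append, List.nil_append] at heq
      have hcb : c = b := by injection heq
      have := h1 c (List.mem_cons_self ..)
      rw [hcb] at this; rw [this] at hb; cases hb
    | cons d l3 =>
      simp only [List.cons_append] at heq
      have hcd : c = d := by injection heq
      have htl : l1 ++ a :: l2 = l3 ++ b :: l4 := by injection heq
      obtain ⟨h₁, h₂, h₃⟩ := ih l3 htl (fun y hy => h1 y (List.mem_cons_of_mem c hy)) ha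
        (fun y hy => h3 y (List.mem_cons_of_mem d hy)) hb
      exact ⟨by rw [hcd, h₁], h₂, h₃⟩

-- ----- pvMatch / addT -----
lemma pvMatch_iff {x : Int} {t : List Int} (ht : t ≠ []) :
    pvMatch x t = true ↔ t.getLast? = some (x - 1) := by
  unfold pvMatch check_if_same_group
  rw [PySem.List.pyGetD_neg_one t 0 ht]
  rw [List.getLast?_eq_some_getLast ht]
  simp only [Bool.and_eq_true, decide_eq_true_eq, beq_iff_eq, Option.some.injEq]
  constructor
  · rintro ⟨-, h⟩; omega
  · intro h
    exact ⟨List.length_pos_of_ne_nil ht, by omega⟩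

lemma pvMatch_false_of_not_last {x : Int} {t : List Int} (h : lastIs (x - 1) t = false) :
    pvMatch x t = false := by
  by_cases ht : t = []
  · subst ht; simp [pvMatch]
  · cases hm : pvMatch x t with
    | false => rfl
    | true =>
      have := lastIs_iff.mpr ((pvMatch_iff ht).mp hm)
      rw [this] at h; cases h

lemma addT_no_match (x : Int) : ∀ (ts : List (List Int)),
    (∀ t ∈ ts, pvMatch x t = false) →
    add_to_first_available_team x ts = ts ++ [[x]] := by
  intro ts
  induction ts with
  | nil => intro _; rfl
  | cons t ts ih =>
    intro h
    rw [add_to_first_available_team, h t (List.mem_cons_self ..)]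
    simp only [Bool.false_eq_true, if_false, List.cons_append, List.cons.injEq, true_and]
    exact ih (fun y hy => h y (List.mem_cons_of_mem t hy))

lemma addT_first (x : Int) : ∀ (u : List (List Int)) {t : List Int} {w : List (List Int)},
    (∀ y ∈ u, pvMatch x y = false) → pvMatch x t = true →
    add_to_first_available_team x (u ++ t :: w) = u ++ (t ++ [x]) :: w := by
  intro u
  induction u with
  | nil => intro t w _ ht; simp only [List.nil_append, add_to_first_available_team, ht, if_true]
  | cons c u ih =>
    intro t w hu ht
    rw [List.cons_append, add_to_first_available_team, hu c (List.mem_cons_self ..)]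
    simp only [Bool.false_eq_true, if_false, List.cons_append, List.cons.injEq, true_and]
    exact ih (fun y hy => hu y (List.mem_cons_of_mem c hy)) ht

-- ----- TeamOK -----
lemma teamOK_ne_nil {v : Int} {t : List Int} (h : TeamOK v t) : t ≠ [] := by
  rcases h with ⟨a, l, ha, -⟩
  intro hnil; rw [hnil] at ha; cases ha

lemma teamOK_mono {v v' : Int} {t : List Int} (h : TeamOK v t) (hvv : v ≤ v') : TeamOK v' t := by
  rcases h with ⟨a, l, h1, h2, h3, h4, h5⟩
  exact ⟨a, l, h1, h2, h3, by omega, h5⟩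

lemma teamOK_single {x : Int} (hb : -2147483648 ≤ x) : TeamOK x [x] :=
  ⟨x, x, rfl, rfl, by simp, le_refl x, hb⟩

lemma teamOK_extend {v x : Int} {t : List Int} (h : TeamOK v t)
    (hl : t.getLast? = some (x - 1)) : TeamOK x (t ++ [x]) := by
  rcases h with ⟨a, l, h1, h2, h3, h4, h5⟩
  have hlx : l = x - 1 := by rw [h2] at hl; injection hl
  refine ⟨a, x, ?_, by simp, ?_, le_refl x, h5⟩
  · rcases t with - | ⟨b, t'⟩
    · cases h1
    · simpa using h1
  · simp only [List.length_append, List.length_cons, List.length_nil]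
    push_cast
    omega

lemma teamOK_last_gt {v w : Int} {t : List Int} (h : TeamOK v t) (hw : v < w) :
    lastIs w t = false := by
  rcases h with ⟨a, l, -, h2, -, h4, -⟩
  cases hb : lastIs w t with
  | false => rfl
  | true =>
    rw [lastIs_iff, h2] at hb
    have : l = w := by injection hb
    omega

lemma lastIs_excl {v w : Int} {t : List Int} (hvw : v ≠ w) (h : lastIs v t = true) :
    lastIs w t = false := by
  cases hb : lastIs w t with
  | false => rfl
  | true =>
    rw [lastIs_iff] at h hb
    rw [h] at hb
    exact absurd (by injection hb) hvw


-- more Bool helpers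
lemma bfalse {b : Bool} (h : ¬ b = true) : b = false := by
  cases b
  · rfl
  · exact absurd rfl h

lemma lastIs_single_self (x : Int) : lastIs x [x] = true := by simp [lastIs]

lemma lastIs_single_ne {v x : Int} (h : x ≠ v) : lastIs v [x] = false := by
  simp [lastIs, h]

lemma lastIs_concat_self (t : List Int) (x : Int) : lastIs x (t ++ [x]) = true := by
  simp [lastIs]

lemma lastIs_concat_ne (t : List Int) {v x : Int} (h : x ≠ v) : lastIs v (t ++ [x]) = false := by
  simp [lastIs, h]

lemma combT_eq_lastIs_of_no_prev {v : Int} {u : List (List Int)}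
    (hu : ∀ y ∈ u, lastIs (v-1) y = false) :
    u.filter (combT v) = u.filter (lastIs v) :=
  List.filter_congr (fun y hy => by simp [combT, hu y hy])

lemma filter_lastIs_nil_of_ok {w v : Int} {ts : List (List Int)}
    (hok : ∀ t ∈ ts, TeamOK v t) (hw : v < w) : ts.filter (lastIs w) = [] :=
  List.filter_eq_nil_iff.mpr (fun t ht => by rw [teamOK_last_gt (hok t ht) hw]; simp)

-- closing a column: retiring the unextended pending teams turns 'dead w.r.t. v' into 'last ≠ v'
lemma best_close {n v : Int} {teams : List (List Int)} {pending : List Int} {best : Int}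
    (hp : pending = lens (teams.filter (lastIs (v-1))))
    (hbest : best = Mf n (lens (teams.filter (fun t => !combT v t)))) :
    retireMin best pending = Mf n (lens (teams.filter (fun t => !lastIs v t))) := by
  rw [retireMin_eq_Mf, hbest, hp, ← Mf_append]
  have h1 : lens (teams.filter (fun t => !combT v t)) ++ lens (teams.filter (lastIs (v-1)))
      = lens (teams.filter (fun t => !combT v t) ++ teams.filter (lastIs (v-1))) := by
    simp [lens]
  rw [h1]
  apply Mf_perm
  apply List.Perm.map
  have hdisj : ∀ a ∈ teams, ¬((fun t => !combT v t) a = true ∧ lastIs (v-1) a = true) := by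
    rintro a - ⟨h1', h2'⟩
    have hc : combT v a = true := by simp [combT, h2']
    simp [hc] at h1'
  have heq : teams.filter (fun a => !combT v a || lastIs (v-1) a)
      = teams.filter (fun t => !lastIs v t) := by
    apply List.filter_congr
    intro t _
    cases hv : lastIs v t with
    | true =>
      have hb := lastIs_excl (show v ≠ v - 1 by omega) hv
      simp [combT, hv, hb]
    | false =>
      cases hb : lastIs (v-1) t <;> simp [combT, hv, hb]
  exact (filter_or_perm _ _ teams hdisj).trans (by rw [heq])

lemma teams_perm_parts {v : Int} {teams : List (List Int)}
    (hcomb : teams.filter (combT v)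
      = teams.filter (lastIs v) ++ teams.filter (lastIs (v-1))) :
    (teams.filter (fun t => !combT v t)
      ++ (teams.filter (lastIs (v-1)) ++ teams.filter (lastIs v))).Perm teams := by
  refine List.Perm.trans ?_ (List.filter_append_perm (combT v) teams)
  rw [hcomb]
  exact (List.perm_append_comm).trans ((List.perm_append_comm).append_right _)

-- retiring everything that is still open recovers the minimum over all team lengths
lemma finalB_state {n v : Int} {teams : List (List Int)} {pending active : List Int}
    {best : Int} (hinv : GInv n v teams pending active best) :
    retireMin (retireMin best pending) active = Mf n (lens teams) := by
  obtain ⟨ha, hp, hcomb, hbest, -⟩ := hinv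
  rw [retireMin_eq_Mf, retireMin_eq_Mf, hbest, hp, ha, ← Mf_append, ← Mf_append]
  have h1 : lens (teams.filter (fun t => !combT v t))
        ++ (lens (teams.filter (lastIs (v-1))) ++ lens (teams.filter (lastIs v)))
      = lens ((teams.filter (fun t => !combT v t))
        ++ (teams.filter (lastIs (v-1)) ++ teams.filter (lastIs v))) := by
    simp [lens]
  rw [h1]
  exact Mf_perm (List.Perm.map _ (teams_perm_parts hcomb)) n

-- ----- step preservation -----
lemma step_preserve (n v x : Int) (teams : List (List Int)) (pending active : List Int)
    (best : Int) (hinv : GInv n v teams pending active best) (hvx : v ≤ x)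
    (hxb : -2147483648 ≤ x) :
    ∃ pending' active' best',
      stepB (some v, pending, active, best) x = (some x, pending', active', best') ∧
      GInv n x (add_to_first_available_team x teams) pending' active' best' ∧
      (lens (add_to_first_available_team x teams)).sum = (lens teams).sum + 1 ∧
      add_to_first_available_team x teams ≠ [] := by
  obtain ⟨ha, hp, hcomb, hbest, hok⟩ := hinv
  by_cases hxv : x = v
  · -- CASE 1: duplicate of the current value
    subst hxv
    cases hpe : teams.filter (lastIs (x-1)) with
    | nil =>
      have hpend : pending = [] := by rw [hp, hpe]; rfl
      have haddt : add_to_first_available_team x teams = teams ++ [[x]] :=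
        addT_no_match x teams (fun t ht =>
          pvMatch_false_of_not_last (bfalse (List.filter_eq_nil_iff.mp hpe t ht)))
      refine ⟨[], active ++ [1], best, ?_, ⟨?_, ?_, ?_, ?_, ?_⟩, ?_, ?_⟩
      · simp [stepB, hpend]
      · rw [haddt, List.filter_append]
        simp only [List.filter_cons, lastIs_single_self, if_true, List.filter_nil]
        simp [lens, ha]
      · rw [haddt, List.filter_append]
        simp only [List.filter_cons, lastIs_single_ne (show x ≠ x - 1 by omega),
          Bool.false_eq_true, if_false, List.filter_nil]
        rw [hpe]; simp [lens]
      · rw [haddt, List.filter_append, List.filter_append, List.filter_append]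
        have h1 : List.filter (combT x) [[x]] = [[x]] := by
          simp [List.filter_cons, combT, lastIs_single_self]
        have h2 : List.filter (lastIs x) [[x]] = [[x]] := by
          simp [List.filter_cons, lastIs_single_self]
        have h3 : List.filter (lastIs (x-1)) [[x]] = [] := by
          simp [List.filter_cons, lastIs_single_ne (show x ≠ x - 1 by omega)]
        rw [h1, h2, h3, hcomb, hpe]
        simp
      · rw [haddt, List.filter_append]
        have h1 : List.filter (fun t => !combT x t) [[x]] = [] := by
          simp [List.filter_cons, combT, lastIs_single_self]
        rw [h1, List.append_nil]; exact hbest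
      · rw [haddt]
        intro t ht
        rcases List.mem_append.mp ht with h | h
        · exact hok t h
        · rw [List.mem_singleton.mp h]
          exact teamOK_single hxb
      · rw [haddt]; simp [lens, List.sum_append]
      · rw [haddt]; simp
    | cons t PT' =>
      obtain ⟨u, w, hteams, hu, hpt, hw⟩ := List.filter_eq_cons_iff.mp hpe
      have hu' : ∀ y ∈ u, lastIs (x-1) y = false := fun y hy => bfalse (hu y hy)
      have htm : t ∈ teams := by
        rw [hteams]; exact List.mem_append_right _ (List.mem_cons_self ..)
      have htok := hok t htm
      have htne := teamOK_ne_nil htok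
      have htlast : t.getLast? = some (x-1) := lastIs_iff.mp hpt
      have htlv : lastIs x t = false := lastIs_excl (show x - 1 ≠ x by omega) hpt
      have haddt : add_to_first_available_team x teams = u ++ (t ++ [x]) :: w := by
        rw [hteams]
        exact addT_first x u (fun y hy => pvMatch_false_of_not_last (hu' y hy))
          ((pvMatch_iff htne).mpr htlast)
      have hcombu : u.filter (combT x) = u.filter (lastIs x) := combT_eq_lastIs_of_no_prev hu'
      have hcombt : combT x t = true := by simp [combT, hpt]
      have hsplit : u.filter (lastIs x) ++ t :: w.filter (combT x)
          = teams.filter (lastIs x) ++ t :: PT' := by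
        rw [← hcombu]
        have h0 : teams.filter (combT x) = u.filter (combT x) ++ t :: w.filter (combT x) := by
          rw [hteams, List.filter_append, List.filter_cons, hcombt]
          simp
        rw [← h0, hcomb, hpe]
      obtain ⟨hATu, -, hWcomb⟩ := split_unique (lastIs x) _ _ hsplit
        (fun y hy => List.of_mem_filter hy) htlv
        (fun y hy => List.of_mem_filter hy) htlv
      have hWv : w.filter (lastIs x) = [] := by
        have h1 : w.filter (lastIs x) = (w.filter (combT x)).filter (lastIs x) := by
          rw [List.filter_filter]
          apply List.filter_congr
          intro y _
          cases hy : lastIs x y <;> simp [combT, hy]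
        rw [h1, hWcomb]
        apply List.filter_eq_nil_iff.mpr
        intro y hy
        have hy' : y ∈ w.filter (lastIs (x-1)) := by rw [hw]; exact hy
        rw [lastIs_excl (show x - 1 ≠ x by omega) (List.of_mem_filter hy')]
        simp
      have hfu1 : u.filter (lastIs (x-1)) = [] :=
        List.filter_eq_nil_iff.mpr (fun y hy => by rw [hu' y hy]; simp)
      have hlt : (((t ++ [x]).length : Int)) = (t.length : Int) + 1 := by
        rw [List.length_append]; push_cast; simp
      have hpcons : pending = (t.length : Int) :: lens PT' := by rw [hp, hpe]; rfl
      have hcombtx : combT x (t ++ [x]) = true := by simp [combT, lastIs_concat_self]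
      refine ⟨lens PT', active ++ [(t.length : Int) + 1], best, ?_, ⟨?_, ?_, ?_, ?_, ?_⟩, ?_, ?_⟩
      · simp [stepB, hpcons]
      · rw [haddt, List.filter_append, List.filter_cons, lastIs_concat_self]
        simp only [if_true]
        rw [hATu, hWv, ha]
        simp [lens, hlt]
      · rw [haddt, List.filter_append, List.filter_cons,
          lastIs_concat_ne t (show x ≠ x - 1 by omega), hfu1, hw]
        simp
      · rw [haddt, List.filter_append, List.filter_append, List.filter_append,
          List.filter_cons, List.filter_cons, List.filter_cons, hcombtx,
          lastIs_concat_self, lastIs_concat_ne t (show x ≠ x - 1 by omega),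
          hcombu, hATu, hWcomb, hWv, hfu1, hw]
        simp
      · have hnd : (u ++ (t ++ [x]) :: w).filter (fun t => !combT x t)
            = (u ++ t :: w).filter (fun t => !combT x t) := by
          rw [List.filter_append, List.filter_append, List.filter_cons, List.filter_cons,
            hcombt, hcombtx]
          simp
        rw [haddt, hnd, ← hteams]; exact hbest
      · rw [haddt]
        intro y hy
        rcases List.mem_append.mp hy with h | h
        · exact hok y (by rw [hteams]; exact List.mem_append_left _ h)
        · rcases List.mem_cons.mp h with rfl | h
          · exact teamOK_extend htok htlast
          · exact hok y (by rw [hteams]; exact List.mem_append_right _ (List.mem_cons_of_mem _ h))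
      · rw [haddt, hteams]
        simp [lens, List.sum_append, List.length_append]
        push_cast
        ring
      · rw [haddt]; simp
  · have hvxlt : v < x := lt_of_le_of_ne hvx (fun h => hxv h.symm)
    have hvne : v ≠ x := by omega
    by_cases hx1 : x = v + 1
    · -- CASE 2: next consecutive value
      have hx1' : x - 1 = v := by omega
      cases hae : teams.filter (lastIs (x-1)) with
      | nil =>
        have hact : active = [] := by rw [ha, ← hx1', hae]; rfl
        have haddt : add_to_first_available_team x teams = teams ++ [[x]] :=
          addT_no_match x teams (fun t ht =>
            pvMatch_false_of_not_last (bfalse (List.filter_eq_nil_iff.mp hae t ht)))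
        have hoklt : ∀ t ∈ teams, lastIs x t = false :=
          fun t ht => teamOK_last_gt (hok t ht) hvxlt
        refine ⟨[], [1], retireMin best pending, ?_, ⟨?_, ?_, ?_, ?_, ?_⟩, ?_, ?_⟩
        · simp [stepB, hvne, hx1', hact]
        · rw [haddt, List.filter_append, List.filter_eq_nil_iff.mpr
            (fun t ht => by rw [hoklt t ht]; simp)]
          simp [List.filter_cons, lastIs_single_self, lens]
        · rw [haddt, List.filter_append, hae]
          simp [List.filter_cons, lastIs_single_ne (show x ≠ x - 1 by omega), lens]
        · have h1 : teams.filter (combT x) = [] := by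
            rw [show teams.filter (combT x) = teams.filter (lastIs (x-1)) from
              List.filter_congr (fun t ht => by simp [combT, hoklt t ht]), hae]
          have hA : teams.filter (lastIs x) = [] :=
            List.filter_eq_nil_iff.mpr (fun t ht => by rw [hoklt t ht]; simp)
          rw [haddt, List.filter_append, List.filter_append, List.filter_append, h1, hA, hae]
          simp [List.filter_cons, combT, lastIs_single_self,
            lastIs_single_ne (show x ≠ x - 1 by omega)]
        · have h2 : (teams ++ [[x]]).filter (fun t => !combT x t)
              = teams.filter (fun t => !lastIs (x-1) t) := by
            rw [List.filter_append]
            have h3 : List.filter (fun t => !combT x t) [[x]] = [] := by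
              simp [List.filter_cons, combT, lastIs_single_self]
            rw [h3, List.append_nil]
            exact List.filter_congr (fun t ht => by simp [combT, hoklt t ht])
          rw [haddt, h2, hx1']
          exact best_close hp hbest
        · rw [haddt]
          intro t ht
          rcases List.mem_append.mp ht with h | h
          · exact teamOK_mono (hok t h) hvx
          · rw [List.mem_singleton.mp h]
            exact teamOK_single hxb
        · rw [haddt]; simp [lens, List.sum_append]
        · rw [haddt]; simp
      | cons t AT' =>
        obtain ⟨u, w, hteams, hu, hpt, hw⟩ := List.filter_eq_cons_iff.mp hae
        have hu' : ∀ y ∈ u, lastIs (x-1) y = false := fun y hy => bfalse (hu y hy)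
        have htm : t ∈ teams := by
          rw [hteams]; exact List.mem_append_right _ (List.mem_cons_self ..)
        have htok := hok t htm
        have htne := teamOK_ne_nil htok
        have htlast : t.getLast? = some (x-1) := lastIs_iff.mp hpt
        have haddt : add_to_first_available_team x teams = u ++ (t ++ [x]) :: w := by
          rw [hteams]
          exact addT_first x u (fun y hy => pvMatch_false_of_not_last (hu' y hy))
            ((pvMatch_iff htne).mpr htlast)
        have hum : ∀ y ∈ u, y ∈ teams := fun y hy => by
          rw [hteams]; exact List.mem_append_left _ hy
        have hwm : ∀ y ∈ w, y ∈ teams := fun y hy => by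
          rw [hteams]; exact List.mem_append_right _ (List.mem_cons_of_mem _ hy)
        have hux : ∀ y ∈ u, lastIs x y = false :=
          fun y hy => teamOK_last_gt (hok y (hum y hy)) hvxlt
        have hwx : ∀ y ∈ w, lastIs x y = false :=
          fun y hy => teamOK_last_gt (hok y (hwm y hy)) hvxlt
        have hactive : active = (t.length : Int) :: lens AT' := by
          rw [ha, ← hx1', hae]; rfl
        have hlt : (((t ++ [x]).length : Int)) = (t.length : Int) + 1 := by
          rw [List.length_append]; push_cast; simp
        have hfux : u.filter (lastIs x) = [] :=
          List.filter_eq_nil_iff.mpr (fun y hy => by rw [hux y hy]; simp)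
        have hfwx : w.filter (lastIs x) = [] :=
          List.filter_eq_nil_iff.mpr (fun y hy => by rw [hwx y hy]; simp)
        have hfu1 : u.filter (lastIs (x-1)) = [] :=
          List.filter_eq_nil_iff.mpr (fun y hy => by rw [hu' y hy]; simp)
        refine ⟨lens AT', [(t.length : Int) + 1], retireMin best pending, ?_,
          ⟨?_, ?_, ?_, ?_, ?_⟩, ?_, ?_⟩
        · simp [stepB, hvne, hx1', hactive]
        · rw [haddt, List.filter_append, List.filter_cons, lastIs_concat_self, hfux, hfwx]
          simp [lens, hlt]
        · rw [haddt, List.filter_append, List.filter_cons,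
            lastIs_concat_ne t (show x ≠ x - 1 by omega), hfu1, hw]
          simp
        · have hcu : u.filter (combT x) = [] := by
            apply List.filter_eq_nil_iff.mpr
            intro y hy
            simp [combT, hux y hy, hu' y hy]
          have hcw : w.filter (combT x) = w.filter (lastIs (x-1)) :=
            List.filter_congr (fun y hy => by simp [combT, hwx y hy])
          rw [haddt, List.filter_append, List.filter_append, List.filter_append,
            List.filter_cons, List.filter_cons, List.filter_cons,
            show combT x (t ++ [x]) = true from by simp [combT, lastIs_concat_self],
            lastIs_concat_self, lastIs_concat_ne t (show x ≠ x - 1 by omega),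
            hcu, hcw, hfux, hfwx, hfu1, hw]
          simp
        · have hdu : u.filter (fun y => !combT x y) = u := by
            apply List.filter_eq_self.mpr
            intro y hy
            simp [combT, hux y hy, hu' y hy]
          have hdw : w.filter (fun y => !combT x y) = w.filter (fun y => !lastIs (x-1) y) :=
            List.filter_congr (fun y hy => by simp [combT, hwx y hy])
          have hfus : u.filter (fun y => !lastIs (x-1) y) = u :=
            List.filter_eq_self.mpr (fun y hy => by simp [hu' y hy])
          have hgoal : (u ++ (t ++ [x]) :: w).filter (fun y => !combT x y)
              = teams.filter (fun y => !lastIs (x-1) y) := by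
            rw [List.filter_append, List.filter_cons,
              show (!combT x (t ++ [x])) = false from by
                simp [combT, lastIs_concat_self]]
            simp only [Bool.false_eq_true, if_false]
            rw [hdu, hdw, hteams, List.filter_append, List.filter_cons,
              show (!lastIs (x-1) t) = false from by simp [hpt]]
            simp only [Bool.false_eq_true, if_false]
            rw [hfus]
          rw [haddt, hgoal, hx1']
          exact best_close hp hbest
        · rw [haddt]
          intro y hy
          rcases List.mem_append.mp hy with h | h
          · exact teamOK_mono (hok y (hum y h)) hvx
          · rcases List.mem_cons.mp h with rfl | h
            · exact teamOK_extend (teamOK_mono htok hvx) htlast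
            · exact teamOK_mono (hok y (hwm y h)) hvx
        · rw [haddt, hteams]
          simp [lens, List.sum_append, List.length_append]
          push_cast
          ring
        · rw [haddt]; simp
    · -- CASE 3: gap in values
      have hgap : v < x - 1 := by omega
      have hvne1 : v ≠ x - 1 := by omega
      have hok1 : ∀ t ∈ teams, lastIs (x-1) t = false :=
        fun t ht => teamOK_last_gt (hok t ht) hgap
      have hokx : ∀ t ∈ teams, lastIs x t = false :=
        fun t ht => teamOK_last_gt (hok t ht) hvxlt
      have haddt : add_to_first_available_team x teams = teams ++ [[x]] :=
        addT_no_match x teams (fun t ht => pvMatch_false_of_not_last (hok1 t ht))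
      refine ⟨[], [1], retireMin (retireMin best pending) active, ?_, ⟨?_, ?_, ?_, ?_, ?_⟩, ?_, ?_⟩
      · simp [stepB, hvne, hvne1]
      · have hA : teams.filter (lastIs x) = [] :=
          List.filter_eq_nil_iff.mpr (fun t ht => by rw [hokx t ht]; simp)
        rw [haddt, List.filter_append, hA]
        simp [List.filter_cons, lastIs_single_self, lens]
      · have hP : teams.filter (lastIs (x-1)) = [] :=
          List.filter_eq_nil_iff.mpr (fun t ht => by rw [hok1 t ht]; simp)
        rw [haddt, List.filter_append, hP]
        simp [List.filter_cons, lastIs_single_ne (show x ≠ x - 1 by omega), lens]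
      · have hA : teams.filter (lastIs x) = [] :=
          List.filter_eq_nil_iff.mpr (fun t ht => by rw [hokx t ht]; simp)
        have hP : teams.filter (lastIs (x-1)) = [] :=
          List.filter_eq_nil_iff.mpr (fun t ht => by rw [hok1 t ht]; simp)
        have hC : teams.filter (combT x) = [] :=
          List.filter_eq_nil_iff.mpr (fun t ht => by
            simp [combT, hokx t ht, hok1 t ht])
        rw [haddt, List.filter_append, List.filter_append, List.filter_append, hC, hA, hP]
        simp [List.filter_cons, combT, lastIs_single_self,
          lastIs_single_ne (show x ≠ x - 1 by omega)]
      · have h2 : (teams ++ [[x]]).filter (fun t => !combT x t) = teams := by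
          rw [List.filter_append]
          have h3 : List.filter (fun t => !combT x t) [[x]] = [] := by
            simp [List.filter_cons, combT, lastIs_single_self]
          rw [h3, List.append_nil]
          exact List.filter_eq_self.mpr (fun t ht => by simp [combT, hokx t ht, hok1 t ht])
        rw [haddt, h2]
        exact finalB_state ⟨ha, hp, hcomb, hbest, hok⟩
      · rw [haddt]
        intro t ht
        rcases List.mem_append.mp ht with h | h
        · exact teamOK_mono (hok t h) hvx
        · rw [List.mem_singleton.mp h]
          exact teamOK_single hxb
      · rw [haddt]; simp [lens, List.sum_append]
      · rw [haddt]; simp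

-- ----- main induction -----
lemma main_inv : ∀ (rest : List Int) (v n : Int) (teams : List (List Int))
    (pending active : List Int) (best : Int),
    GInv n v teams pending active best →
    List.Pairwise (· ≤ ·) (v :: rest) →
    (∀ y ∈ v :: rest, -2147483648 ≤ y ∧ y ≤ 2147483648) →
    (lens teams).sum + (rest.length : Int) = n →
    teams ≠ [] →
    finalA (rest.foldl (fun acc x => add_to_first_available_team x acc) teams)
      = finalB (rest.foldl stepB (some v, pending, active, best)) := by
  intro rest
  induction rest with
  | nil =>
    intro v n teams pending active best hinv hpw hbd hsum hne
    simp only [List.foldl_nil]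
    rw [finalA_eq]
    have hB : finalB (some v, pending, active, best) = Mf n (lens teams) := finalB_state hinv
    rw [hB]
    rcases hts : teams with - | ⟨t0, ts⟩
    · exact absurd hts hne
    obtain ⟨a, l, h1, h2, h3, h4, h5⟩ := hinv.2.2.2.2 t0 (hts ▸ List.mem_cons_self ..)
    apply Mf_init_congr
    refine ⟨(t0.length : Int), by simp [lens, hts], ?_, ?_⟩
    · have hv : v ≤ 2147483648 := (hbd v (List.mem_cons_self ..)).2
      have hb1 : (t0.length : Int) ≤ 4294967298 := by omega
      have hM : (4294967298 : Int) ≤ MAX_GROUP_SIZE := by unfold MAX_GROUP_SIZE; omega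
      omega
    · have hnn : ∀ y ∈ lens teams, 0 ≤ y := by
        intro y hy
        simp only [lens, List.mem_map] at hy
        obtain ⟨t, -, rfl⟩ := hy
        positivity
      have hle := List.single_le_sum hnn (t0.length : Int) (by simp [lens, hts])
      simp only [List.length_nil, Int.natCast_zero, add_zero] at hsum
      omega
  | cons x rest ih =>
    intro v n teams pending active best hinv hpw hbd hsum hne
    have hvx : v ≤ x := (List.pairwise_cons.mp hpw).1 x (List.mem_cons_self ..)
    have hxb := hbd x (List.mem_cons_of_mem v (List.mem_cons_self ..))
    obtain ⟨pending', active', best', hstep, hinv', hsum', hne'⟩ :=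
      step_preserve n v x teams pending active best hinv hvx hxb.1
    simp only [List.foldl_cons]
    rw [hstep]
    apply ih x n _ _ _ _ hinv' (List.pairwise_cons.mp hpw).2
      (fun y hy => hbd y (List.mem_cons_of_mem _ hy)) ?_ hne'
    rw [hsum']
    simp only [List.length_cons] at hsum
    push_cast at hsum ⊢
    omega

theorem find_smallest_consecutive_sublist_spec : Claim_equal_find_smallest_consecutive_sublist := by
  unfold Claim_equal_find_smallest_consecutive_sublist
  intro skill_list hdom
  unfold Spec_find_smallest_consecutive_sublist
  unfold find_smallest_consecutive_sublist find_smallest_consecutive_sublist_alt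
  have hbd : ∀ y ∈ PySem.List.sorted skill_list (fun x => x) false,
      -2147483648 ≤ y ∧ y ≤ 2147483648 := by
    intro y hy
    rw [PySem.List.mem_sorted] at hy
    have := List.all_eq_true.mp hdom y hy
    simp only [pvDomInt, decide_eq_true_eq] at this
    exact this
  cases hse : PySem.List.sorted skill_list (fun x => x) false with
  | nil => simp [hse]
  | cons x0 rest =>
    rw [hse] at hbd
    have hpw : List.Pairwise (· ≤ ·) (x0 :: rest) := by
      have := PySem.List.sorted_pairwise skill_list (fun x => x)
      rw [hse] at this
      exact this
    simp only [hse, List.length_cons, List.foldl_cons]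
    have hlen : ¬ (rest.length + 1 = 0) := by omega
    rw [if_neg hlen, if_neg hlen]
    have hstep0 : stepB (none, [], [], ((rest.length + 1 : Nat) : Int)) x0
        = (some x0, [], [1], ((rest.length + 1 : Nat) : Int)) := by
      simp [stepB, retireMin]
    rw [hstep0]
    have hbuild : build_list_of_team_sets (x0 :: rest)
        = rest.foldl (fun acc x => add_to_first_available_team x acc) [[x0]] := by
      simp [build_list_of_team_sets, List.foldl_cons, add_to_first_available_team]
    rw [hbuild]
    have hx0b := hbd x0 (List.mem_cons_self ..)
    have hinv0 : GInv ((rest.length + 1 : Nat) : Int) x0 [[x0]] [] [1]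
        ((rest.length + 1 : Nat) : Int) := by
      refine ⟨?_, ?_, ?_, ?_, ?_⟩
      · simp [lens, List.filter_cons, lastIs_single_self]
      · simp [lens, List.filter_cons, lastIs_single_ne (show x0 ≠ x0 - 1 by omega)]
      · simp [List.filter_cons, combT, lastIs_single_self,
          lastIs_single_ne (show x0 ≠ x0 - 1 by omega)]
      · simp [List.filter_cons, combT, lastIs_single_self, lens, Mf]
      · intro t ht
        rw [List.mem_singleton.mp ht]
        exact teamOK_single hx0b.1
    exact main_inv rest x0 _ [[x0]] [] [1] _ hinv0 hpw hbd
      (by simp [lens]; push_cast; ring) (by simp)
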